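-- pv_equiv track=rewrite | github.com/winlaic/winlaic | utils.py | parse_message_list
-- ===== SOURCE A (Python) =====
-- def parse_message_list(message_list):
--     if isinstance(message_list, list) or isinstance(message_list, tuple):
--         ret = ''
--         for i_item, item in enumerate(message_list):
--             ret += str(item)
--             if i_item % 2 == 0:
--                 ret += ': '
--             else:
--                 ret += '\t'
--         return ret[0:-1]
--     else:
--         return str(message_list)
-- ===== SOURCE B (Python) =====
-- def parse_message_list(message_list):
--     if isinstance(message_list, list) or isinstance(message_list, tuple):
--         parts = []
--         pending = None
--         for item in message_list:
--             if pending is None: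
--                 pending = str(item)
--             else:
--                 parts.append(f"{pending}: {item}")
--                 pending = None
--         if pending is not None:
--             parts.append(pending + ':')
--         return '\t'.join(parts)
--     else:
--         return str(message_list)
-- ===== Notes on version B (the rewrite author's own statement) =====
-- stated objective: alternative
-- what changed: B builds a list of 'key: value' parts in one pass using a pending-key accumulator (with a lone trailing 'key:' part for odd length) and joins them with tab, instead of A's single string concatenation with an index-parity branch followed by stripping the last character.
import Mathlib
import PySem

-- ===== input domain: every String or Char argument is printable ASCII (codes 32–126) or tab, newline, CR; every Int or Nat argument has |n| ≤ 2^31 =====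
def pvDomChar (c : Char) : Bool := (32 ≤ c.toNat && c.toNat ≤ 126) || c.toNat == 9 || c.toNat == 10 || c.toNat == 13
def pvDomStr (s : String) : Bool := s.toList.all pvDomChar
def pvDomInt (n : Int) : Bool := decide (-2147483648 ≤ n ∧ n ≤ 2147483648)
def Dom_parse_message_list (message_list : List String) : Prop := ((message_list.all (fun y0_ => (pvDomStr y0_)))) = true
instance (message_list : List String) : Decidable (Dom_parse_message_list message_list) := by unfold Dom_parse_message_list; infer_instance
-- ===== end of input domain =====

-- B accumulates a list of 'key: value' parts with a pending-key state and joins them with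
-- tab, instead of A's index-parity string concatenation with a final-character strip
-- (objective: alternative decomposition).
-- Strings are carried as their code-point lists (List Char) and packed with String.ofList at
-- the end, the exact representation of Python's strings per the PySem convention.

-- ===== PORT A =====
-- the loop body: ret += str(item); then ': ' or '\t' by parity of the index
def parse_message_list (message_list : List String) : String :=
  let ret : List Char :=
    (PySem.List.enumerate message_list 0).foldl
      (fun ret p =>
        ret ++ p.2.toList ++ (if PySem.Int.mod p.1 2 == 0 then [':', ' '] else ['\t']))
      []
  String.ofList (PySem.List.slice ret (some 0) (some (-1)))   -- ret[0:-1]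

-- ===== PORT B =====
-- loop body: first of a pair is remembered as the pending key, the second closes the part
def pvStepB (st : List (List Char) × Option String) (item : String) :
    List (List Char) × Option String :=
  match st.2 with
  | none => (st.1, some item)
  | some k => (st.1 ++ [k.toList ++ [':', ' '] ++ item.toList], none)

-- the trailing 'if pending is not None: parts.append(pending + ':')'
def pvFinishB (st : List (List Char) × Option String) : List (List Char) :=
  match st.2 with
  | none => st.1
  | some k => st.1 ++ [k.toList ++ [':']]

def parse_message_list_alt (message_list : List String) : String :=
  String.ofList (PySem.Chars.join ['\t'] (pvFinishB (message_list.foldl pvStepB ([], none))))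

-- ===== PRECONDITION & SPEC =====
def Spec_parse_message_list (message_list : List String) (out : String) : Prop := out = parse_message_list_alt message_list
instance (message_list : List String) (out : String) : Decidable (Spec_parse_message_list message_list out) := by unfold Spec_parse_message_list; infer_instance

-- ===== CLAIM (what is proved, stated in full; the proofs are below) =====
def Claim_equal_parse_message_list : Prop := ∀ (message_list : List String), Dom_parse_message_list message_list → Spec_parse_message_list message_list (parse_message_list message_list)

-- ===== LEMMAS AND PROOFS =====

-- pairwise specification both loops are proved to meet
def pvFmtB (rest : List String) : List (List Char) :=
  match rest with
  | [] => []
  | [x] => [x.toList ++ [':']]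
  | x :: y :: r => (x.toList ++ [':', ' '] ++ y.toList) :: pvFmtB r

theorem pvB_fold (l : List String) : ∀ (parts : List (List Char)),
    pvFinishB (l.foldl pvStepB (parts, none)) = parts ++ pvFmtB l := by
  induction l using pvFmtB.induct with
  | case1 => intro parts; simp [pvFinishB, pvFmtB]
  | case2 x => intro parts; simp [pvStepB, pvFinishB, pvFmtB]
  | case3 x y r ih =>
    intro parts
    show pvFinishB (List.foldl pvStepB (pvStepB (pvStepB (parts, none) x) y) r) =
      parts ++ pvFmtB (x :: y :: r)
    rw [show pvStepB (pvStepB (parts, none) x) y =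
        (parts ++ [x.toList ++ [':', ' '] ++ y.toList], none) from rfl, ih]
    simp [pvFmtB]


-- recursive characterisation of A's loop body (the string built so far, index s onwards)
def pvASeq (s : Int) (l : List String) : List Char :=
  match l with
  | [] => []
  | x :: xs => x.toList ++ (if s % 2 == 0 then [':', ' '] else ['\t']) ++ pvASeq (s + 1) xs

theorem pvA_fold_eq (l : List String) : ∀ (s : Int) (acc : List Char),
    (PySem.List.enumerate l s).foldl
      (fun ret p =>
        ret ++ p.2.toList ++ (if PySem.Int.mod p.1 2 == 0 then [':', ' '] else ['\t']))
      acc = acc ++ pvASeq s l := by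
  induction l with
  | nil => intro s acc; simp [PySem.List.enumerate_nil, pvASeq]
  | cons x xs ih =>
    intro s acc
    rw [PySem.List.enumerate_cons]
    simp only [List.foldl_cons]
    rw [ih, PySem.Int.mod_eq_emod_of_pos (by norm_num : (0:Int) < 2)]
    simp [pvASeq, List.append_assoc]

theorem pvASeq_ne_nil (s : Int) (l : List String) (h : l ≠ []) : pvASeq s l ≠ [] := by
  cases l with
  | nil => exact absurd rfl h
  | cons x xs => simp only [pvASeq]; split <;> simp

theorem pvFmtB_ne_nil (l : List String) (h : l ≠ []) : pvFmtB l ≠ [] := by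
  cases l with
  | nil => exact absurd rfl h
  | cons x xs => cases xs <;> simp [pvFmtB]

theorem pvMain (l : List String) : ∀ (s : Int), s % 2 = 0 →
    (pvASeq s l).dropLast = PySem.Chars.join ['\t'] (pvFmtB l) := by
  induction l using pvFmtB.induct with
  | case1 => intro s _; simp [pvASeq, pvFmtB, PySem.Chars.join_nil]
  | case2 x =>
    intro s hs
    simp only [pvASeq, pvFmtB, PySem.Chars.join_singleton]
    rw [if_pos (by simp [hs])]
    simp only [List.append_nil]
    rw [List.dropLast_append_of_ne_nil (by simp : ([':', ' '] : List Char) ≠ [])]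
    simp
  | case3 x y r ih =>
    intro s hs
    have h1 : (s + 1) % 2 = 1 := by omega
    have h2 : (s + 1 + 1) % 2 = 0 := by omega
    cases r with
    | nil =>
      simp only [pvASeq, pvFmtB, PySem.Chars.join_singleton]
      rw [if_pos (by simp [hs]), if_neg (by simp [h1])]
      simp only [List.append_nil]
      rw [List.dropLast_append_of_ne_nil (by simp : (y.toList ++ ['\t']) ≠ []),
        List.dropLast_concat]
    | cons z zs =>
      have hnr : pvASeq (s + 1 + 1) (z :: zs) ≠ [] := pvASeq_ne_nil _ _ (by simp)
      have hfr : pvFmtB (z :: zs) ≠ [] := pvFmtB_ne_nil _ (by simp)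
      obtain ⟨p, ps, hps⟩ : ∃ p ps, pvFmtB (z :: zs) = p :: ps := by
        cases hpf : pvFmtB (z :: zs) with
        | nil => exact absurd hpf hfr
        | cons p ps => exact ⟨p, ps, rfl⟩
      have ihr := ih (s + 1 + 1) h2
      rw [hps] at ihr
      show (pvASeq s (x :: y :: z :: zs)).dropLast =
        PySem.Chars.join ['\t'] (pvFmtB (x :: y :: z :: zs))
      simp only [pvASeq, pvFmtB, hps]
      rw [if_pos (by simp [hs]), if_neg (by simp [h1]), PySem.Chars.join_cons_cons,
        show (z.toList ++ (if ((s + 1 + 1) % 2 == 0) = true then [':', ' '] else ['\t'])) ++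
            pvASeq (s + 1 + 1 + 1) zs = pvASeq (s + 1 + 1) (z :: zs) from rfl,
        List.dropLast_append_of_ne_nil (by simp : (y.toList ++ ['\t']) ++
            pvASeq (s + 1 + 1) (z :: zs) ≠ []),
        List.dropLast_append_of_ne_nil hnr, ihr]
      simp

-- ===== VERDICT (by name: the statement is the Claim_ definition above) =====
theorem parse_message_list_spec : Claim_equal_parse_message_list := by
  intro l _
  show parse_message_list l = parse_message_list_alt l
  unfold parse_message_list parse_message_list_alt
  rw [pvA_fold_eq l 0 []]
  simp only [List.nil_append, PySem.List.slice_zero_start, PySem.List.slice_to_neg_one]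
  rw [pvMain l 0 (by decide), pvB_fold l []]
  simp
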